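-- pv_equiv track=rewrite | github.com/murasakiwano/DataStructures-2021-1 | Livro4Recursao/palindromo_recursivo.py | removeWhite
-- ===== SOURCE A (Python) =====
-- def removeWhite(s):
--     if s:
--         if len(s) == 1:
--             if str.isalpha(s[0]):
--                 return s[0].lower()
--             else:
--                 return ""
--         else:
--             if str.isalpha(s[0]):
--                 return removeWhite(s[1:]) + s[0].lower()
--             else:
--                 return removeWhite(s[1:])
--     return ""
-- ===== SOURCE B (Python) =====
-- def removeWhite(s):
--     acc = []
--     for c in s:
--         if c.isalpha():
--             acc.append(c.lower())
--     return ''.join(reversed(acc))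
-- ===== Notes on version B (the rewrite author's own statement) =====
-- stated objective: faster
-- what changed: Replaced the quadratic recursion (s[1:] copies the string at every step, concatenating results) by a single forward loop that collects lowercased letters in a list and reverses once at the end.
import Mathlib
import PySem

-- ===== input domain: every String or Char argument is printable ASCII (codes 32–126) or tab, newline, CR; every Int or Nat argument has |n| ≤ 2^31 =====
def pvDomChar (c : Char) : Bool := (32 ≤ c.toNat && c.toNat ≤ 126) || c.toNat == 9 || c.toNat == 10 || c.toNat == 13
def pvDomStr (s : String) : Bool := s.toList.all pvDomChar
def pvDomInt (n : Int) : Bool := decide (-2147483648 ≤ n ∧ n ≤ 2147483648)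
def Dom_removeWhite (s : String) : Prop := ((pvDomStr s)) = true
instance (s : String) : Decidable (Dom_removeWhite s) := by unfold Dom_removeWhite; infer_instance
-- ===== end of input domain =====

-- B replaces A's recursion on s[1:] (quadratic string copying + concatenation) with one
-- forward pass collecting lowercased letters, reversed once at the end.

-- ===== PORT A =====
-- A's recursion on the string, transcribed on its character list: the len==1 base case,
-- then the 'letter: recurse then append s[0].lower()' / 'non-letter: recurse' branches.
def removeWhiteAux : List Char → List Char
  | [] => []
  | [c] => if PySem.Chars.isalpha c then [PySem.Chars.lowerChar c] else []
  | c :: d :: rest =>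
      if PySem.Chars.isalpha c then removeWhiteAux (d :: rest) ++ [PySem.Chars.lowerChar c]
      else removeWhiteAux (d :: rest)

def removeWhite (s : String) : String := String.ofList (removeWhiteAux s.toList)

-- ===== PORT B =====
-- B's loop: fold over the characters appending lowered letters to acc, then reverse.
def removeWhite_alt (s : String) : String :=
  let acc := s.toList.foldl
    (fun acc c => if PySem.Chars.isalpha c then acc ++ [PySem.Chars.lowerChar c] else acc) []
  String.ofList acc.reverse

-- ===== PRECONDITION & SPEC =====
def Spec_removeWhite (s : String) (out : String) : Prop := out = removeWhite_alt s
instance (s : String) (out : String) : Decidable (Spec_removeWhite s out) := by unfold Spec_removeWhite; infer_instance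

-- ===== CLAIM (what is proved, stated in full; the proofs are below) =====
def Claim_equal_removeWhite : Prop := ∀ (s : String), Dom_removeWhite s → Spec_removeWhite s (removeWhite s)

-- ===== LEMMAS AND PROOFS =====

-- A's recursion computes the reversed lowercased letters.
theorem removeWhiteAux_eq (l : List Char) :
    removeWhiteAux l = ((l.filter PySem.Chars.isalpha).map PySem.Chars.lowerChar).reverse := by
  induction l with
  | nil => rfl
  | cons c rest ih =>
    cases rest with
    | nil => simp only [removeWhiteAux, List.filter]; split <;> simp_all
    | cons d t =>
      simp only [removeWhiteAux, ih, List.filter]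
      split <;> simp_all

-- B's fold accumulates the lowercased letters in order.
theorem foldl_acc (l : List Char) (acc : List Char) :
    l.foldl (fun acc c => if PySem.Chars.isalpha c then acc ++ [PySem.Chars.lowerChar c] else acc) acc
      = acc ++ (l.filter PySem.Chars.isalpha).map PySem.Chars.lowerChar := by
  induction l generalizing acc with
  | nil => simp
  | cons c rest ih =>
    simp only [List.foldl, List.filter]
    split <;> simp_all

-- ===== VERDICT (by name: the statement is the Claim_ definition above) =====
theorem removeWhite_spec : Claim_equal_removeWhite := by
  intro s _
  unfold Spec_removeWhite removeWhite removeWhite_alt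
  simp [removeWhiteAux_eq, foldl_acc]
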